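-- pv_equiv track=rewrite | github.com/Radbruch/mit-6001x | PS3/Hangman.py | getAvailableLetters
-- ===== SOURCE A (Python) =====
-- def getAvailableLetters(lettersGuessed):
--     '''
--     lettersGuessed: list, what letters have been guessed so far
--     returns: string, comprised of letters that represents what letters have not
--       yet been guessed.
--     '''
--     avalist = []
--     import string
--     avastr = string.ascii_lowercase
--     for a in avastr:
--         avalist += a
--     for i in lettersGuessed:
--         if i in avalist:
--             avalist.pop(avalist.index(i))
--     avastr = ''
--     for e in avalist:
--         avastr += e
--     return avastr
-- ===== SOURCE B (Python) =====
-- import string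
--
-- def getAvailableLetters(lettersGuessed):
--     return ''.join(sorted(set(string.ascii_lowercase) - set(lettersGuessed)))
-- ===== Notes on version B (the rewrite author's own statement) =====
-- stated objective: simpler
-- what changed: Replaces A's three explicit loops (copy alphabet into a list, pop each guessed letter by index via a linear scan, re-concatenate char by char) with a single sorted set-difference expression.
import Mathlib
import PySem

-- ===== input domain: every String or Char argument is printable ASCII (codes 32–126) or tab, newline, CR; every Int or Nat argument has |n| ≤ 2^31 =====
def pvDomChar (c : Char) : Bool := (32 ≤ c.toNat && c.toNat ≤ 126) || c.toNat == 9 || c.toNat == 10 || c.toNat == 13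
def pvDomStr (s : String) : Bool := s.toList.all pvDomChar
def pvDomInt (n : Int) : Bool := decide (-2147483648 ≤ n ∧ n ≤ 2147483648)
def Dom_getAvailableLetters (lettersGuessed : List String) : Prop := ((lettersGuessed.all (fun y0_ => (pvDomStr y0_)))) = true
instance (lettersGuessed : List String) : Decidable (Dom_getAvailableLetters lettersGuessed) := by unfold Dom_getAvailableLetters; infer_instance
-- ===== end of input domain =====

-- B replaces A's three explicit loops (copy the alphabet into a list, pop each guessed
-- letter by index, re-concatenate) by one sorted set-difference expression.

-- ===== PORT A =====
-- 'avalist.pop(avalist.index(i))' guarded by 'if i in avalist'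
def pvRemoveGuessed (aval : List String) (i : String) : List String :=
  if aval.contains i then
    match PySem.List.index? aval i with
    | some k => (((PySem.List.pop? aval (k : Int)).map (·.2)).getD aval)
    | none => aval
  else aval

def getAvailableLetters (lettersGuessed : List String) : String :=
  -- avalist = []; for a in string.ascii_lowercase: avalist += a
  let avalist : List String :=
    "abcdefghijklmnopqrstuvwxyz".toList.foldl (fun acc a => acc ++ [String.ofList [a]]) []
  -- for i in lettersGuessed: if i in avalist: avalist.pop(avalist.index(i))
  let avalist := lettersGuessed.foldl pvRemoveGuessed avalist
  -- avastr = ''; for e in avalist: avastr += e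
  avalist.foldl (fun avastr e => avastr ++ e) ""

-- ===== PORT B =====
def getAvailableLetters_alt (lettersGuessed : List String) : String :=
  PySem.Str.join ""
    (PySem.List.sorted
      (PySem.Set.diff
        (PySem.Set.ofList ("abcdefghijklmnopqrstuvwxyz".toList.map (fun c => String.ofList [c])))
        (PySem.Set.ofList lettersGuessed))
      (fun x => x) false)

-- ===== PRECONDITION & SPEC =====
def Spec_getAvailableLetters (lettersGuessed : List String) (out : String) : Prop := out = getAvailableLetters_alt lettersGuessed
instance (lettersGuessed : List String) (out : String) : Decidable (Spec_getAvailableLetters lettersGuessed out) := by unfold Spec_getAvailableLetters; infer_instance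

-- ===== CLAIM (what is proved, stated in full; the proofs are below) =====
def Claim_equal_getAvailableLetters : Prop := ∀ (lettersGuessed : List String), Dom_getAvailableLetters lettersGuessed → Spec_getAvailableLetters lettersGuessed (getAvailableLetters lettersGuessed)

-- ===== LEMMAS AND PROOFS =====

-- one step of A's removal loop, on a duplicate-free list, is a filter
theorem pvRemoveGuessed_eq_filter (l : List String) (i : String) (hnd : l.Nodup) :
    pvRemoveGuessed l i = l.filter (fun a => a != i) := by
  unfold pvRemoveGuessed
  by_cases hm : i ∈ l
  · have hidx : PySem.List.index? l i = some (l.idxOf i) := by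
      rw [PySem.List.index?_eq_idxOf?]
      have h1 := List.idxOf_eq_getD_idxOf? i l
      have h2 : (List.idxOf? i l).isSome := by
        rw [← PySem.List.index?_eq_idxOf?, PySem.List.index?_isSome_iff]; exact hm
      obtain ⟨k, hk⟩ := Option.isSome_iff_exists.mp h2
      rw [hk] at h1 ⊢
      simp at h1
      rw [h1]
    have hlt : l.idxOf i < l.length := List.idxOf_lt_length_of_mem hm
    have hpop := PySem.List.pop?_natCast (xs := l) (n := l.idxOf i) hlt
    simp only [hm, List.contains_eq_mem, decide_true, if_true, hidx, hpop, Option.map_some,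
      Option.getD_some]
    rw [List.eraseIdx_idxOf_eq_erase, List.Nodup.erase_eq_filter hnd]
  · simp only [List.contains_eq_mem, hm, decide_false]
    exact (List.filter_eq_self.mpr (fun a ha => by
      simp only [bne_iff_ne, ne_eq]; rintro rfl; exact hm ha)).symm

-- A's whole removal loop, on a duplicate-free list, is one filter
theorem pvFold_eq_filter (gs : List String) : ∀ (l : List String), l.Nodup →
    gs.foldl pvRemoveGuessed l = l.filter (fun a => !gs.contains a) := by
  induction gs with
  | nil => intro l _; simp
  | cons i gs ih =>
    intro l hnd
    rw [List.foldl_cons, pvRemoveGuessed_eq_filter l i hnd, ih _ (hnd.filter _),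
      List.filter_filter]
    apply List.filter_congr
    intro a _
    simp only [List.contains_cons]
    cases h : (a == i) <;> simp [h, bne]

def pvAlphS : List String := "abcdefghijklmnopqrstuvwxyz".toList.map (fun c => String.ofList [c])

theorem pvAlphS_nodup : pvAlphS.Nodup := by decide

theorem pvAlphS_pairwise : pvAlphS.Pairwise (· < ·) := by
  have h : pvAlphS.Pairwise (fun a b => a.toList < b.toList) := by decide
  exact h.imp (fun hl => String.lt_iff_toList_lt.mpr hl)

-- ''.join over chars lists is flatten
theorem pvCharsJoin_nil (ls : List (List Char)) : PySem.Chars.join [] ls = ls.flatten := by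
  induction ls with
  | nil => simp [PySem.Chars.join_nil]
  | cons a t ih =>
    cases t with
    | nil => simp [PySem.Chars.join_singleton]
    | cons b r =>
      rw [PySem.Chars.join_cons_cons, ih]
      simp

theorem pvFoldlAppend_toList (xs : List String) : ∀ (s : String),
    (xs.foldl (fun avastr e => avastr ++ e) s).toList = s.toList ++ (xs.map String.toList).flatten := by
  induction xs with
  | nil => intro s; simp
  | cons a t ih =>
    intro s
    rw [List.foldl_cons, ih]
    simp [String.toList_append]

-- A's last loop ('avastr += e') equals ''.join
theorem pvFoldlAppend_eq_join (xs : List String) :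
    xs.foldl (fun avastr e => avastr ++ e) "" = PySem.Str.join "" xs := by
  have h : (xs.foldl (fun avastr e => avastr ++ e) "").toList
      = (PySem.Str.join "" xs).toList := by
    rw [pvFoldlAppend_toList, PySem.Str.toList_join,
      show ("" : String).toList = [] from rfl, pvCharsJoin_nil]
    simp
  calc xs.foldl (fun avastr e => avastr ++ e) ""
      = String.ofList (xs.foldl (fun avastr e => avastr ++ e) "").toList := by
        rw [String.ofList_toList]
    _ = String.ofList (PySem.Str.join "" xs).toList := by rw [h]
    _ = PySem.Str.join "" xs := by rw [String.ofList_toList]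

-- ===== VERDICT (by name: the statement is the Claim_ definition above) =====
theorem getAvailableLetters_spec : Claim_equal_getAvailableLetters := by
  intro gs _
  show getAvailableLetters gs = getAvailableLetters_alt gs
  unfold getAvailableLetters getAvailableLetters_alt
  dsimp only
  have h0 : "abcdefghijklmnopqrstuvwxyz".toList.foldl (fun acc a => acc ++ [String.ofList [a]]) []
      = pvAlphS := by
    rw [PySem.List.foldl_append_singleton_eq_map]; rfl
  rw [h0, pvFold_eq_filter gs pvAlphS pvAlphS_nodup, pvFoldlAppend_eq_join]
  congr 1
  have hset : PySem.Set.ofList pvAlphS = pvAlphS :=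
    PySem.Set.ofList_eq_self_of_nodup pvAlphS pvAlphS_nodup
  have hdiff : PySem.Set.diff pvAlphS (PySem.Set.ofList gs)
      = pvAlphS.filter (fun a => !gs.contains a) := by
    unfold PySem.Set.diff
    apply List.filter_congr
    intro a _
    simp [PySem.Set.contains, List.contains_eq_mem, PySem.Set.mem_ofList]
  have hgoal : pvAlphS.filter (fun a => !gs.contains a)
      = PySem.List.sorted
          (PySem.Set.diff (PySem.Set.ofList pvAlphS) (PySem.Set.ofList gs)) (fun x => x) false := by
    rw [hset, hdiff]
    exact (PySem.List.sorted_eq_self_of_pairwise _ _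
      ((pvAlphS_pairwise.sublist (List.filter_sublist (l := pvAlphS))).imp (fun h => le_of_lt h))).symm
  exact hgoal
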